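-- pv_equiv track=rewrite | github.com/yunfucheng/DouZero | play.py | format_hand_cards
-- ===== SOURCE A (Python) =====
-- from collections import Counter
--
-- def format_hand_cards(cards):
--     """格式化手牌为可读字符串"""
--     card_count = Counter(cards)
--     result = []
--
--     EnvCard2RealCard = {3: '3', 4: '4', 5: '5', 6: '6', 7: '7',
--                        8: '8', 9: '9', 10: '10', 11: 'J', 12: 'Q',
--                        13: 'K', 14: 'A', 17: '2', 20: '小王', 30: '大王'}
--
--     for card in sorted(card_count.keys()):
--         card_name = EnvCard2RealCard.get(card, str(card))
--         count = card_count[card]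
--         if count == 1:
--             result.append(card_name)
--         else:
--             result.append(f"{card_name}×{count}")
--     return " ".join(result)
-- ===== SOURCE B (Python) =====
-- def format_hand_cards(cards):
--     """格式化手牌为可读字符串"""
--     EnvCard2RealCard = {3: '3', 4: '4', 5: '5', 6: '6', 7: '7',
--                         8: '8', 9: '9', 10: '10', 11: 'J', 12: 'Q',
--                         13: 'K', 14: 'A', 17: '2', 20: '小王', 30: '大王'}
--
--     def token(card, n):
--         name = EnvCard2RealCard.get(card, str(card))
--         return name if n == 1 else f"{name}×{n}"
--
--     tokens = []
--     cur = 0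
--     n = 0
--     for c in sorted(cards):
--         if n > 0 and c == cur:
--             n += 1
--         else:
--             if n > 0:
--                 tokens.append(token(cur, n))
--             cur = c
--             n = 1
--     if n > 0:
--         tokens.append(token(cur, n))
--     return " ".join(tokens)
-- ===== Notes on version B (the rewrite author's own statement) =====
-- stated objective: alternative
-- what changed: Replaces the Counter dict plus a sort over its distinct keys by a single run-length pass over the fully sorted card list, maintaining (current value, run length) instead of any dictionary.
import Mathlib
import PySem

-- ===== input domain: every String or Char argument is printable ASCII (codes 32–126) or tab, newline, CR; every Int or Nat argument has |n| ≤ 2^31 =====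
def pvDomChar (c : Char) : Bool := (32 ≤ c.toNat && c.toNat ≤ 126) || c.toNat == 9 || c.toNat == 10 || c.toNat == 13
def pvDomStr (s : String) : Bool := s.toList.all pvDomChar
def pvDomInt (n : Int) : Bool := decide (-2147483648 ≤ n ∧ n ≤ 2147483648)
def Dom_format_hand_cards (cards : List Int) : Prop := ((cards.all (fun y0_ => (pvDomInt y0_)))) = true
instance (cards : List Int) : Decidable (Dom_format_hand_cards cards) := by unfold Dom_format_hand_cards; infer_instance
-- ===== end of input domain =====

-- B replaces A's Counter-then-sort-distinct-keys pass by one run-length pass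
-- over the fully sorted card list (alternative decomposition, same cost).

-- shared literal table (the same dict literal appears in both Python sources)
def EnvCard2RealCard : PySem.Dict Int String :=
  PySem.Dict.ofList [(3, "3"), (4, "4"), (5, "5"), (6, "6"), (7, "7"),
                     (8, "8"), (9, "9"), (10, "10"), (11, "J"), (12, "Q"),
                     (13, "K"), (14, "A"), (17, "2"), (20, "小王"), (30, "大王")]

-- ===== PORT A =====
def format_hand_cards (cards : List Int) : String :=
  let card_count := PySem.Dict.counter cards
  let result := (PySem.List.sorted card_count.keys (fun x => x) false).foldl
    (fun result card =>
      let card_name := (EnvCard2RealCard.get? card).getD (PySem.Int.toStr card)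
      let count := card_count.getD card 0
      if count == 1 then result ++ [card_name]
      else result ++ [card_name ++ "×" ++ PySem.Int.toStr count]) []
  PySem.Str.join " " result

-- ===== PORT B =====
def fhcToken (card : Int) (n : Int) : String :=
  let name := (EnvCard2RealCard.get? card).getD (PySem.Int.toStr card)
  if n == 1 then name else name ++ "×" ++ PySem.Int.toStr n

def fhcStep (st : List String × Int × Int) (c : Int) : List String × Int × Int :=
  if st.2.2 > 0 ∧ c = st.2.1 then (st.1, st.2.1, st.2.2 + 1)
  else ((if st.2.2 > 0 then st.1 ++ [fhcToken st.2.1 st.2.2] else st.1), c, 1)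

def format_hand_cards_alt (cards : List Int) : String :=
  let st := (PySem.List.sorted cards (fun x => x) false).foldl fhcStep ([], 0, 0)
  let tokens := if st.2.2 > 0 then st.1 ++ [fhcToken st.2.1 st.2.2] else st.1
  PySem.Str.join " " tokens

-- ===== PRECONDITION & SPEC =====
def Spec_format_hand_cards (cards : List Int) (out : String) : Prop := out = format_hand_cards_alt cards
instance (cards : List Int) (out : String) : Decidable (Spec_format_hand_cards cards out) := by unfold Spec_format_hand_cards; infer_instance

-- ===== CLAIM (what is proved, stated in full; the proofs are below) =====
def Claim_equal_format_hand_cards : Prop := ∀ (cards : List Int), Dom_format_hand_cards cards → Spec_format_hand_cards cards (format_hand_cards cards)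

-- ===== LEMMAS AND PROOFS =====

-- flush of B's loop state (the port's final 'if st.2.2 > 0 …')
def fhcFlush (toks : List String) (c n : Int) : List String :=
  if n > 0 then toks ++ [fhcToken c n] else toks

-- A's loop appends one token per (distinct, sorted) key
lemma fhcA_tokens (cards : List Int) : ∀ (S : List Int) (res : List String),
    S.foldl (fun result card =>
      let card_name := (EnvCard2RealCard.get? card).getD (PySem.Int.toStr card)
      let count := (PySem.Dict.counter cards).getD card 0
      if count == 1 then result ++ [card_name]
      else result ++ [card_name ++ "×" ++ PySem.Int.toStr count]) res
    = res ++ S.map (fun k => fhcToken k ((cards.count k : Int))) := by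
  intro S
  induction S with
  | nil => intro res; simp
  | cons k T ih =>
    intro res
    simp only [List.foldl_cons, List.map_cons]
    rw [ih]
    simp only [fhcToken, PySem.Dict.getD_counter]
    split <;> simp

-- inside a run: every further equal element just increments the counter
lemma fhcStep_replicate (toks : List String) (k : Int) : ∀ (m : Nat) (j : Int), 1 ≤ j →
    (List.replicate m k).foldl fhcStep (toks, k, j) = (toks, k, j + m) := by
  intro m
  induction m with
  | zero => intro j hj; simp
  | succ m ih =>
    intro j hj
    rw [List.replicate_succ, List.foldl_cons]
    have h1 : fhcStep (toks, k, j) k = (toks, k, j + 1) := by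
      simp only [fhcStep]
      split
      · rfl
      · next hcond => exact absurd ⟨by omega, by trivial⟩ hcond
    rw [h1, ih (j + 1) (by omega)]
    have h2 : j + 1 + (m : Int) = j + ((m + 1 : Nat) : Int) := by push_cast; ring
    rw [h2]

-- the run-length loop over concatenated runs of strictly increasing values
lemma fhc_run_fold (f : Int → Nat) : ∀ (S : List Int) (toks : List String) (c n : Int),
    S.Pairwise (· < ·) → (∀ k ∈ S, 0 < f k) → (n = 0 ∨ (1 ≤ n ∧ ∀ k ∈ S, c ≠ k)) →
    (let st := (S.flatMap (fun k => List.replicate (f k) k)).foldl fhcStep (toks, c, n)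
     fhcFlush st.1 st.2.1 st.2.2)
    = fhcFlush toks c n ++ S.map (fun k => fhcToken k ((f k : Int))) := by
  intro S
  induction S with
  | nil => intro toks c n _ _ _; simp [fhcFlush]
  | cons k T ih =>
    intro toks c n hpw hpos hn
    have hfk : 0 < f k := hpos k (by simp)
    have hrep : List.replicate (f k) k = k :: List.replicate (f k - 1) k := by
      rw [← List.replicate_succ]; congr 1; omega
    have hfirst : fhcStep (toks, c, n) k = (fhcFlush toks c n, k, 1) := by
      rcases hn with h0 | ⟨h1, hne⟩
      · subst h0
        simp [fhcStep, fhcFlush]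
      · have hcond : ¬ ((toks, c, n).2.2 > 0 ∧ k = (toks, c, n).2.1) := by
          rintro ⟨_, rfl⟩; exact hne k (by simp) rfl
        simp only [fhcStep, if_neg hcond, fhcFlush]
    simp only [List.flatMap_cons, List.foldl_append, hrep, List.foldl_cons, hfirst]
    rw [fhcStep_replicate _ _ _ 1 le_rfl]
    have hcast : (1 : Int) + ((f k - 1 : Nat) : Int) = ((f k : Nat) : Int) := by
      push_cast [Nat.cast_sub (by omega : 1 ≤ f k)]; ring
    rw [hcast]
    rw [ih (fhcFlush toks c n) k (f k)
      (hpw.sublist (List.sublist_cons_self k T))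
      (fun k' hk' => hpos k' (by simp [hk']))
      (Or.inr ⟨by exact_mod_cast hfk, fun k' hk' => ne_of_lt (List.rel_of_pairwise_cons hpw hk')⟩)]
    have hflush : fhcFlush (fhcFlush toks c n) k ((f k : Int)) =
        fhcFlush toks c n ++ [fhcToken k ((f k : Int))] := by
      unfold fhcFlush
      rw [if_pos (by exact_mod_cast hfk : ((f k : Int)) > 0)]
    rw [hflush]
    simp

-- counts in the concatenation of runs
lemma fhc_count_flat (f : Int → Nat) : ∀ (S : List Int) (v : Int), S.Nodup →
    (S.flatMap (fun k => List.replicate (f k) k)).count v = if v ∈ S then f v else 0 := by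
  intro S
  induction S with
  | nil => intro v _; simp
  | cons k T ih =>
    intro v hnd
    simp only [List.flatMap_cons, List.count_append, List.count_replicate, ih v hnd.of_cons]
    by_cases hv : v = k
    · subst hv
      have : v ∉ T := (List.nodup_cons.mp hnd).1
      simp [this]
    · simp [hv, Ne.symm hv]

-- the concatenation of runs of strictly increasing values is ≤-sorted
lemma fhc_pairwise_flat (f : Int → Nat) : ∀ (S : List Int), S.Pairwise (· < ·) →
    (S.flatMap (fun k => List.replicate (f k) k)).Pairwise (· ≤ ·) := by
  intro S
  induction S with
  | nil => intro _; simp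
  | cons k T ih =>
    intro hpw
    simp only [List.flatMap_cons]
    rw [List.pairwise_append]
    refine ⟨List.pairwise_replicate.mpr (Or.inr le_rfl), ih hpw.of_cons, ?_⟩
    intro a ha b hb
    rw [List.eq_of_mem_replicate ha]
    rcases List.mem_flatMap.mp hb with ⟨k', hk', hb'⟩
    rw [List.eq_of_mem_replicate hb']
    exact le_of_lt (List.rel_of_pairwise_cons hpw hk')

theorem format_hand_cards_spec : Claim_equal_format_hand_cards := by
  intro cards _
  show format_hand_cards cards = format_hand_cards_alt cards
  simp only [format_hand_cards, format_hand_cards_alt]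
  rw [PySem.Dict.keys_counter]
  set S := PySem.List.sorted (PySem.Set.ofList cards) (fun x => x) false with hS
  have hSpw : S.Pairwise (· < ·) := PySem.List.sorted_ofList_pairwise_lt cards
  have hSnd : S.Nodup := hSpw.imp (fun h => ne_of_lt h)
  have hmemS : ∀ v, v ∈ S ↔ v ∈ cards := by
    intro v
    rw [hS, PySem.List.mem_sorted, PySem.Set.mem_ofList]
  set L := S.flatMap (fun k => List.replicate (cards.count k) k) with hLdef
  have hperm : L.Perm cards := by
    rw [List.perm_iff_count]
    intro v
    rw [hLdef, fhc_count_flat _ S v hSnd]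
    by_cases hv : v ∈ S
    · simp [hv]
    · have : v ∉ cards := fun h => hv ((hmemS v).mpr h)
      simp [hv, List.count_eq_zero.mpr this]
  have hL : PySem.List.sorted cards (fun x => x) false = L :=
    PySem.List.sorted_id_eq_of_perm_of_pairwise cards L hperm (fhc_pairwise_flat _ S hSpw)
  rw [fhcA_tokens cards S [], hL]
  have hrun := fhc_run_fold (fun k => cards.count k) S [] 0 0 hSpw
    (fun k hk => List.count_pos_iff.mpr ((hmemS k).mp hk)) (Or.inl rfl)
  simp only [fhcFlush] at hrun
  rw [if_neg (by omega : ¬ (0 : Int) > 0)] at hrun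
  rw [hrun]
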